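-- pv_equiv track=rewrite | github.com/AssassinQuin/hs_analysis | analysis/search/abilities/extractors.py | extract_plus_stats
-- ===== SOURCE A (Python) =====
-- from typing import Tuple, Optional
--
-- def extract_plus_stats(text: str) -> Tuple[int, int]:
--     tl = text.lower()
--     atk = 0
--     hp = 0
--     parts = tl.replace("+", " +").replace("/", " / ").split()
--     i = 0
--     while i < len(parts):
--         p = parts[i]
--         if p.startswith("+") and p[1:].isdigit():
--             val = int(p[1:])
--             if i + 2 < len(parts) and parts[i + 1] == "/" and parts[i + 2].startswith("+") and parts[i + 2][1:].isdigit():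
--                 atk = val
--                 hp = int(parts[i + 2][1:])
--                 break
--             if "attack" in " ".join(parts[i:i + 3]):
--                 atk += val
--             elif "health" in " ".join(parts[i:i + 3]):
--                 hp += val
--             else:
--                 atk += val
--         i += 1
--     return atk, hp
-- ===== SOURCE B (Python) =====
-- from typing import Tuple
--
-- def extract_plus_stats(text: str) -> Tuple[int, int]:
--     parts = text.lower().replace("+", " +").replace("/", " / ").split()
--     # pass 1: first "+N / +M" slash pattern wins outright
--     for a, b, c in zip(parts, parts[1:], parts[2:]):
--         if a.startswith("+") and a[1:].isdigit() and b == "/" and c.startswith("+") and c[1:].isdigit():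
--             return int(a[1:]), int(c[1:])
--     # pass 2: no slash pattern anywhere -- classify each "+N" by its 3-token window and sum
--     plus = [(int(p[1:]), " ".join(parts[i:i + 3])) for i, p in enumerate(parts)
--             if p.startswith("+") and p[1:].isdigit()]
--     atk = sum(v for v, w in plus if "attack" in w or "health" not in w)
--     hp = sum(v for v, w in plus if "attack" not in w and "health" in w)
--     return atk, hp
-- ===== Notes on version B (the rewrite author's own statement) =====
-- stated objective: alternative
-- what changed: A's single while loop with in-loop break and mutable accumulators is split into two independent passes: a zip-of-three-shifted-lists scan that returns on the first slash pattern, and, only if none exists, a comprehension pairing each plus token with its 3-token window and computing atk and hp as two filtered sums.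
import Mathlib
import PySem

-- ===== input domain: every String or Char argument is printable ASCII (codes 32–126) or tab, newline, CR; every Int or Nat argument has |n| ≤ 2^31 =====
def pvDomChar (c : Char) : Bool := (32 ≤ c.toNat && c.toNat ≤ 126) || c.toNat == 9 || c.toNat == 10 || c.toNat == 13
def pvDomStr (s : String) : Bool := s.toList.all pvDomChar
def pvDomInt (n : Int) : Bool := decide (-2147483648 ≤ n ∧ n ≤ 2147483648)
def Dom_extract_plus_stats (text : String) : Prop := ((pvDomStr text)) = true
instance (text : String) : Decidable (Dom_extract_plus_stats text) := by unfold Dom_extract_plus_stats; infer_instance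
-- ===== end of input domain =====

-- B differs from A only in decomposition: a slash-pattern search pass over zipped triples, then
-- two filtered sums, instead of A's single while loop with break; same return value everywhere.

-- ===== PORT A =====
-- p.startswith("+") and p[1:].isdigit()
def pvPlusDigit (p : String) : Bool :=
  PySem.Str.startswith p "+" && PySem.Str.strIsdigit (PySem.Str.slice p (some 1) none)

-- int(p[1:]); on every token reaching it pvPlusDigit holds so ofStr? is some (getD 0 is never the default)
def pvVal (p : String) : Int :=
  (PySem.Int.ofStr? (PySem.Str.slice p (some 1) none)).getD 0

-- parts = text.lower().replace("+", " +").replace("/", " / ").split()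
def pvParts (text : String) : List String :=
  PySem.Str.split₀
    (PySem.Str.replace (PySem.Str.replace (PySem.Str.lower text) "+" " +") "/" " / ")

-- 'i + 2 < len(parts) and parts[i+1] == "/" and parts[i+2].startswith("+") and parts[i+2][1:].isdigit()'
-- applied to the suffix after position i; returns int(parts[i+2][1:]) when it holds
def pvSlashPat? : List String → Option Int
  | q :: r :: _ => if q == "/" && pvPlusDigit r then some (pvVal r) else none
  | _ => none

-- " ".join(parts[i:i+3]) for the suffix p :: rest
def pvCtx (p : String) (rest : List String) : String :=
  PySem.Str.join " " (p :: rest.take 2)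

-- the while loop, as structural recursion on the suffix parts[i:]
def pvLoopA : List String → Int → Int → Int × Int
  | [], atk, hp => (atk, hp)
  | p :: rest, atk, hp =>
    if pvPlusDigit p then
      match pvSlashPat? rest with
      | some h => (pvVal p, h)
      | none =>
        if PySem.Str.isIn "attack" (pvCtx p rest) then pvLoopA rest (atk + pvVal p) hp
        else if PySem.Str.isIn "health" (pvCtx p rest) then pvLoopA rest atk (hp + pvVal p)
        else pvLoopA rest (atk + pvVal p) hp
    else pvLoopA rest atk hp

def extract_plus_stats (text : String) : Int × Int :=
  pvLoopA (pvParts text) 0 0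

-- ===== PORT B =====
-- zip(parts, parts[1:], parts[2:])
def pvTriples (parts : List String) : List (String × String × String) :=
  parts.zip ((parts.drop 1).zip (parts.drop 2))

-- pass 1: first slash-pattern triple, 'return' on hit
def pvFindPat (ts : List (String × String × String)) : Option (Int × Int) :=
  ts.findSome? fun t =>
    if pvPlusDigit t.1 && t.2.1 == "/" && pvPlusDigit t.2.2 then some (pvVal t.1, pvVal t.2.2)
    else none

-- [(int(p[1:]), " ".join(parts[i:i+3])) for i, p in enumerate(parts) if …]
def pvPlusList (parts : List String) : List (Int × String) :=
  (PySem.List.enumerate parts 0).filterMap fun ip =>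
    if pvPlusDigit ip.2 then
      some (pvVal ip.2, PySem.Str.join " " (PySem.List.slice parts (some ip.1) (some (ip.1 + 3))))
    else none

def pvAtkPred (w : String) : Bool := PySem.Str.isIn "attack" w || !PySem.Str.isIn "health" w
def pvHpPred (w : String) : Bool := !PySem.Str.isIn "attack" w && PySem.Str.isIn "health" w

def extract_plus_stats_alt (text : String) : Int × Int :=
  let parts := pvParts text
  match pvFindPat (pvTriples parts) with
  | some r => r
  | none =>
    let plus := pvPlusList parts
    (((plus.filter fun vw => pvAtkPred vw.2).map (·.1)).sum,
     ((plus.filter fun vw => pvHpPred vw.2).map (·.1)).sum)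

-- ===== PRECONDITION & SPEC =====
def Spec_extract_plus_stats (text : String) (out : Int × Int) : Prop := out = extract_plus_stats_alt text
instance (text : String) (out : Int × Int) : Decidable (Spec_extract_plus_stats text out) := by unfold Spec_extract_plus_stats; infer_instance

-- ===== CLAIM (what is proved, stated in full; the proofs are below) =====
def Claim_equal_extract_plus_stats : Prop := ∀ (text : String), Dom_extract_plus_stats text → Spec_extract_plus_stats text (extract_plus_stats text)

-- ===== LEMMAS AND PROOFS =====

-- suffix-structural form of B's pass 2 (proof-only helper)
def pvPlusPairs : List String → List (Int × String)
  | [] => []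
  | p :: rest =>
    (if pvPlusDigit p then [(pvVal p, pvCtx p rest)] else []) ++ pvPlusPairs rest

lemma pvPlusList_drop (parts : List String) :
    ∀ n k, parts.length - k = n →
      (PySem.List.enumerate (parts.drop k) (k : Int)).filterMap (fun ip =>
        if pvPlusDigit ip.2 then
          some (pvVal ip.2, PySem.Str.join " " (PySem.List.slice parts (some ip.1) (some (ip.1 + 3))))
        else none)
      = pvPlusPairs (parts.drop k) := by
  intro n
  induction n with
  | zero =>
    intro k hk
    have h : parts.drop k = [] := by
      apply List.eq_nil_of_length_eq_zero
      simp [List.length_drop]; omega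
    simp [h, pvPlusPairs]
  | succ m ih =>
    intro k hk
    cases h : parts.drop k with
    | nil => simp [pvPlusPairs]
    | cons p rest =>
      have hlt : k < parts.length := by
        by_contra hle
        simp [List.drop_eq_nil_of_le (by omega : parts.length ≤ k)] at h
      have hrest : parts.drop (k + 1) = rest := by
        have h2 : List.drop 1 (List.drop k parts) = rest := by rw [h]; rfl
        rw [List.drop_drop] at h2
        simpa [Nat.add_comm] using h2
      have hslice : PySem.List.slice parts (some (k : Int)) (some ((k : Int) + 3)) = p :: rest.take 2 := by
        have h3 : ((k : Int) + 3) = ((k : Int) + ((3 : Nat) : Int)) := by norm_num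
        rw [h3, PySem.List.slice_natCast_add, h]
        rfl
      have hIH := ih (k + 1) (by omega)
      rw [hrest] at hIH
      push_cast at hIH
      rw [PySem.List.enumerate_cons, List.filterMap_cons]
      by_cases hp : pvPlusDigit p
      · simp [pvPlusPairs, hp, pvCtx, hslice, hIH]
      · simp [pvPlusPairs, hp, hIH]

lemma pvPlusList_eq (parts : List String) :
    pvPlusList parts = pvPlusPairs parts := by
  have := pvPlusList_drop parts parts.length 0 (by omega)
  simpa [pvPlusList] using this

-- a skipped token (not "+digits"): A recurses unchanged, B's pass-1 head triple fails
lemma pvSkip (p : String) (rest : List String) (atk hp : Int)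
    (hpd : pvPlusDigit p = false)
    (hft : pvFindPat (pvTriples (p :: rest)) = pvFindPat (pvTriples rest))
    (ih : ∀ atk hp : Int,
      pvLoopA rest atk hp =
        match pvFindPat (pvTriples rest) with
        | some r => r
        | none =>
          (atk + (((pvPlusPairs rest).filter fun vw => pvAtkPred vw.2).map (·.1)).sum,
           hp + (((pvPlusPairs rest).filter fun vw => pvHpPred vw.2).map (·.1)).sum)) :
    pvLoopA (p :: rest) atk hp =
      match pvFindPat (pvTriples (p :: rest)) with
      | some r => r
      | none =>
        (atk + (((pvPlusPairs (p :: rest)).filter fun vw => pvAtkPred vw.2).map (·.1)).sum,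
         hp + (((pvPlusPairs (p :: rest)).filter fun vw => pvHpPred vw.2).map (·.1)).sum) := by
  rw [hft]
  have hstep : pvLoopA (p :: rest) atk hp = pvLoopA rest atk hp := by
    simp only [pvLoopA, hpd, Bool.false_eq_true, if_false]
  rw [hstep, ih]
  cases pvFindPat (pvTriples rest) with
  | some r => rfl
  | none => simp [pvPlusPairs, hpd]

-- one non-breaking step of A's loop, assuming the slash pattern does not fire at the head
lemma pvStep (p : String) (rest : List String) (atk hp : Int)
    (hpat : pvSlashPat? rest = none)
    (hft : pvFindPat (pvTriples (p :: rest)) = pvFindPat (pvTriples rest))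
    (ih : ∀ atk hp : Int,
      pvLoopA rest atk hp =
        match pvFindPat (pvTriples rest) with
        | some r => r
        | none =>
          (atk + (((pvPlusPairs rest).filter fun vw => pvAtkPred vw.2).map (·.1)).sum,
           hp + (((pvPlusPairs rest).filter fun vw => pvHpPred vw.2).map (·.1)).sum)) :
    pvLoopA (p :: rest) atk hp =
      match pvFindPat (pvTriples (p :: rest)) with
      | some r => r
      | none =>
        (atk + (((pvPlusPairs (p :: rest)).filter fun vw => pvAtkPred vw.2).map (·.1)).sum,
         hp + (((pvPlusPairs (p :: rest)).filter fun vw => pvHpPred vw.2).map (·.1)).sum) := by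
  rw [hft]
  by_cases hpd : pvPlusDigit p = true
  · simp only [pvLoopA, hpd, if_true, hpat]
    by_cases ha : PySem.Str.isIn "attack" (pvCtx p rest) = true
    · rw [if_pos ha, ih]
      cases pvFindPat (pvTriples rest) with
      | some r => rfl
      | none =>
        have ha' : pvAtkPred (pvCtx p rest) = true := by simp only [pvAtkPred, ha, Bool.true_or]
        have hh' : pvHpPred (pvCtx p rest) = false := by simp only [pvHpPred, ha, Bool.not_true, Bool.false_and]
        simp [pvPlusPairs, hpd, ha', hh']
        ring
    · rw [if_neg ha]
      by_cases hh : PySem.Str.isIn "health" (pvCtx p rest) = true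
      · rw [if_pos hh, ih]
        cases pvFindPat (pvTriples rest) with
        | some r => rfl
        | none =>
          have ha' : pvAtkPred (pvCtx p rest) = false := by simp only [pvAtkPred, ha, hh, Bool.not_true, Bool.or_self]
          have hh' : pvHpPred (pvCtx p rest) = true := by simp only [pvHpPred, ha, hh, Bool.not_false, Bool.true_and]
          simp [pvPlusPairs, hpd, ha', hh']
          ring
      · rw [if_neg hh, ih]
        cases pvFindPat (pvTriples rest) with
        | some r => rfl
        | none =>
          have ha' : pvAtkPred (pvCtx p rest) = true := by simp only [pvAtkPred, ha, hh, Bool.not_false, Bool.or_true]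
          have hh' : pvHpPred (pvCtx p rest) = false := by simp only [pvHpPred, ha, hh, Bool.and_false]
          simp [pvPlusPairs, hpd, ha', hh']
          ring
  · rw [← hft]
    exact pvSkip p rest atk hp (by simpa using hpd) hft ih

-- characterisation of A's loop: first slash-pattern hit wins, otherwise sums over the plus pairs
lemma pvLoopA_char (parts : List String) : ∀ atk hp : Int,
    pvLoopA parts atk hp =
      match pvFindPat (pvTriples parts) with
      | some r => r
      | none =>
        (atk + (((pvPlusPairs parts).filter fun vw => pvAtkPred vw.2).map (·.1)).sum,
         hp + (((pvPlusPairs parts).filter fun vw => pvHpPred vw.2).map (·.1)).sum) := by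
  induction parts with
  | nil => intro atk hp; simp [pvLoopA, pvTriples, pvFindPat, pvPlusPairs]
  | cons p rest ih =>
    intro atk hp
    rcases rest with _ | ⟨q, _ | ⟨r, t⟩⟩
    · exact pvStep p [] atk hp rfl rfl ih
    · exact pvStep p [q] atk hp rfl rfl ih
    · by_cases hq : (q == "/" && pvPlusDigit r) = true
      · obtain ⟨hq1, hq2⟩ : q = "/" ∧ pvPlusDigit r = true := by simpa using hq
        by_cases hpd : pvPlusDigit p = true
        · -- the slash pattern fires at the head: both programs stop here
          have hpat : pvSlashPat? (q :: r :: t) = some (pvVal r) := by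
            simp [pvSlashPat?, hq1, hq2]
          have hfp : pvFindPat (pvTriples (p :: q :: r :: t)) = some (pvVal p, pvVal r) := by
            simp [pvFindPat, pvTriples, hpd, hq1, hq2]
          have hstep : pvLoopA (p :: q :: r :: t) atk hp = (pvVal p, pvVal r) := by
            simp only [pvLoopA, hpd, if_true, hpat]
          rw [hstep, hfp]
        · -- head is not "+digits": A skips it, B's pass-1 head triple fails on pvPlusDigit p
          have hft : pvFindPat (pvTriples (p :: q :: r :: t)) = pvFindPat (pvTriples (q :: r :: t)) := by
            simp [pvFindPat, pvTriples, hpd]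
          exact pvSkip p (q :: r :: t) atk hp (by simpa using hpd) hft ih
      · have hq' : (q == "/" && pvPlusDigit r) = false := by
          cases h : (q == "/" && pvPlusDigit r)
          · rfl
          · exact absurd h hq
        have hpat : pvSlashPat? (q :: r :: t) = none := by
          simp only [pvSlashPat?, hq', Bool.false_eq_true, if_false]
        have hft : pvFindPat (pvTriples (p :: q :: r :: t)) = pvFindPat (pvTriples (q :: r :: t)) := by
          have hcond : ¬((pvPlusDigit p = true ∧ q = "/") ∧ pvPlusDigit r = true) := by
            rintro ⟨⟨_, h1⟩, h2⟩
            simp [h1, h2] at hq'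
          simp [pvFindPat, pvTriples, hcond]
        exact pvStep p (q :: r :: t) atk hp hpat hft ih

lemma pv_main (parts : List String) : pvLoopA parts 0 0 =
    match pvFindPat (pvTriples parts) with
    | some r => r
    | none =>
      ((((pvPlusList parts).filter fun vw => pvAtkPred vw.2).map (·.1)).sum,
       (((pvPlusList parts).filter fun vw => pvHpPred vw.2).map (·.1)).sum) := by
  rw [pvPlusList_eq, pvLoopA_char]
  cases pvFindPat (pvTriples parts) <;> simp

-- ===== VERDICT (by name: the statement is the Claim_ definition above) =====
theorem extract_plus_stats_spec : Claim_equal_extract_plus_stats := by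
  intro text _
  unfold Spec_extract_plus_stats extract_plus_stats extract_plus_stats_alt
  rw [pv_main]
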